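-- pv_equiv track=rewrite | github.com/sahayaantonyA/ai-foundations | concepts_Implementation/trigram.py | get_words_count
-- ===== SOURCE A (Python) =====
-- def get_words_count(sentences_tokens: list[list[str]]):
--     trigram_count = {}
--     for sentence_tokens in sentences_tokens:
--         for i in range(len(sentence_tokens) - 2):
--             w1, w2, w3 = sentence_tokens[i], sentence_tokens[i+1], sentence_tokens[i+2]
--             if w1 not in trigram_count:
--                 trigram_count[w1] = {}
--             if w2 not in trigram_count[w1]:
--                 trigram_count[w1][w2] = {}
--             if w3 not in trigram_count[w1][w2]:
--                 trigram_count[w1][w2][w3] = 0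
--             trigram_count[w1][w2][w3] += 1
--     return trigram_count
-- ===== SOURCE B (Python) =====
-- def get_words_count(sentences_tokens: list[list[str]]):
--     # Pass 1: flat counter keyed by the trigram tuple.
--     counts = {}
--     for s in sentences_tokens:
--         for i in range(len(s) - 2):
--             key = (s[i], s[i + 1], s[i + 2])
--             counts[key] = counts.get(key, 0) + 1
--     # Pass 2: build the nested dict from the flat table (insertion order preserved).
--     nested = {}
--     for (w1, w2, w3), c in counts.items():
--         nested.setdefault(w1, {}).setdefault(w2, {})[w3] = c
--     return nested
-- ===== Notes on version B (the rewrite author's own statement) =====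
-- stated objective: alternative
-- what changed: B counts trigrams in one flat dict keyed by the (w1,w2,w3) tuple and only afterwards materialises the nested dict in a second pass over the flat table's items, instead of creating and updating the three-level nested dict inside the counting loop like A.
import Mathlib
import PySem

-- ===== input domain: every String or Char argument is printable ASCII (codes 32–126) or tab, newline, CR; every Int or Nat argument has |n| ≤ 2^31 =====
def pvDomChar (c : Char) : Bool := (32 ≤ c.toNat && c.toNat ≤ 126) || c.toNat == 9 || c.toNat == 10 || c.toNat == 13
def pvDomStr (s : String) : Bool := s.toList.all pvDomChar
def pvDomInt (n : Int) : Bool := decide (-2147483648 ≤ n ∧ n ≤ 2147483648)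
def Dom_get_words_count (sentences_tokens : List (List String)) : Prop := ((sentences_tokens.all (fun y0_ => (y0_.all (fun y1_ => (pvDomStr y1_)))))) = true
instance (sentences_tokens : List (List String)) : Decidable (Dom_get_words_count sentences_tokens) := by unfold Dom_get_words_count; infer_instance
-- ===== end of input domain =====

-- B counts trigrams into one flat tuple-keyed dict and builds the nested dict in a
-- second pass over that table, instead of updating the nested dict inside the loop
-- like A; same cost, different structure (objective: alternative).


-- shared dict→list convention: a nested Python dict value rendered as nested assoc lists
def toNested (t : PySem.Dict String (PySem.Dict String (PySem.Dict String Int))) :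
    List (String × List (String × List (String × Int))) :=
  t.items.map (fun p => (p.1, p.2.items.map (fun q => (q.1, q.2.items))))

-- ===== PORT A =====
-- body of A's inner loop (the nested-dict update for one trigram)
def stepA (t : PySem.Dict String (PySem.Dict String (PySem.Dict String Int)))
    (w1 w2 w3 : String) : PySem.Dict String (PySem.Dict String (PySem.Dict String Int)) :=
  let t := if t.contains w1 then t else t.insert w1 PySem.Dict.empty
  let d1 := t.getD w1 PySem.Dict.empty
  let d1 := if d1.contains w2 then d1 else d1.insert w2 PySem.Dict.empty
  let d2 := d1.getD w2 PySem.Dict.empty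
  let d2 := if d2.contains w3 then d2 else d2.insert w3 0
  let d2 := d2.insert w3 (d2.getD w3 0 + 1)
  t.insert w1 (d1.insert w2 d2)

def get_words_count (sentences_tokens : List (List String)) : List (String × List (String × List (String × Int))) :=
  toNested (sentences_tokens.foldl (fun t s =>
      (PySem.List.pyRange 0 ((s.length : Int) - 2) 1).foldl (fun t i =>
        stepA t (PySem.List.pyGetD s i "") (PySem.List.pyGetD s (i + 1) "") (PySem.List.pyGetD s (i + 2) ""))
        t)
    PySem.Dict.empty)

-- ===== PORT B =====
-- pass 2 body: install one flat entry ((w1,w2,w3), c) into the nested dict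
def bstep (t : PySem.Dict String (PySem.Dict String (PySem.Dict String Int)))
    (e : (String × String × String) × Int) : PySem.Dict String (PySem.Dict String (PySem.Dict String Int)) :=
  let d1 := t.getD e.1.1 PySem.Dict.empty
  let d2 := d1.getD e.1.2.1 PySem.Dict.empty
  t.insert e.1.1 (d1.insert e.1.2.1 (d2.insert e.1.2.2 e.2))

def get_words_count_alt (sentences_tokens : List (List String)) : List (String × List (String × List (String × Int))) :=
  let counts := sentences_tokens.foldl (fun d s =>
      (PySem.List.pyRange 0 ((s.length : Int) - 2) 1).foldl (fun d i =>
        let key := (PySem.List.pyGetD s i "", PySem.List.pyGetD s (i + 1) "", PySem.List.pyGetD s (i + 2) "")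
        d.insert key (d.getD key 0 + 1))
        d)
    PySem.Dict.empty
  toNested (counts.items.foldl bstep PySem.Dict.empty)

-- ===== PRECONDITION & SPEC =====
def Spec_get_words_count (sentences_tokens : List (List String)) (out : List (String × List (String × List (String × Int)))) : Prop := out = get_words_count_alt sentences_tokens
instance (sentences_tokens : List (List String)) (out : List (String × List (String × List (String × Int)))) : Decidable (Spec_get_words_count sentences_tokens out) := by unfold Spec_get_words_count; infer_instance

-- ===== CLAIM (what is proved, stated in full; the proofs are below) =====
def Claim_equal_get_words_count : Prop := ∀ (sentences_tokens : List (List String)), Dom_get_words_count sentences_tokens → Spec_get_words_count sentences_tokens (get_words_count sentences_tokens)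

-- ===== LEMMAS AND PROOFS =====

-- the trigram list of one sentence, and the flat-counter step
def tris (s : List String) : List (String × String × String) :=
  (List.range (s.length - 2)).map (fun i => (s.getD i "", s.getD (i + 1) "", s.getD (i + 2) ""))

def gA (t : PySem.Dict String (PySem.Dict String (PySem.Dict String Int)))
    (k : String × String × String) : PySem.Dict String (PySem.Dict String (PySem.Dict String Int)) :=
  stepA t k.1 k.2.1 k.2.2

def fstep (d : PySem.Dict (String × String × String) Int) (k : String × String × String) :
    PySem.Dict (String × String × String) Int :=
  d.insert k (d.getD k 0 + 1)

-- nested lookup of a trigram's count, and "the full path exists"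
def nget (t : PySem.Dict String (PySem.Dict String (PySem.Dict String Int)))
    (k : String × String × String) : Int :=
  ((t.getD k.1 PySem.Dict.empty).getD k.2.1 PySem.Dict.empty).getD k.2.2 0

def pmem (t : PySem.Dict String (PySem.Dict String (PySem.Dict String Int)))
    (k : String × String × String) : Prop :=
  ((t.getD k.1 PySem.Dict.empty).getD k.2.1 PySem.Dict.empty).contains k.2.2 = true

-- both inner index loops are folds of the sentence's trigram list
theorem foldl_pyRange_tris {T : Type} (f : T → String × String × String → T) (s : List String) (t : T) :
    (PySem.List.pyRange 0 ((s.length : Int) - 2) 1).foldl (fun t i =>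
        f t (PySem.List.pyGetD s i "", PySem.List.pyGetD s (i + 1) "", PySem.List.pyGetD s (i + 2) "")) t
      = (tris s).foldl f t := by
  rw [PySem.List.pyRange_one]
  have hn : (((s.length : Int) - 2) - 0).toNat = s.length - 2 := by omega
  rw [hn, tris, List.foldl_map, List.foldl_map]
  refine PySem.List.foldl_congr_mem _ _ _ _ ?_
  intro acc i _
  have e1 : ((0 : Int) + (i : Int)) = ((i : Nat) : Int) := by omega
  have e2 : ((i : Int)) + 1 = (((i + 1 : Nat)) : Int) := by push_cast; omega
  have e3 : ((i : Int)) + 2 = (((i + 2 : Nat)) : Int) := by push_cast; omega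
  rw [e1, e2, e3, PySem.List.pyGetD_natCast, PySem.List.pyGetD_natCast, PySem.List.pyGetD_natCast]


-- A's update of one trigram is exactly B's pass-2 step at count+1
theorem stepA_eq (t : PySem.Dict String (PySem.Dict String (PySem.Dict String Int))) (w1 w2 w3 : String) :
    stepA t w1 w2 w3 = bstep t ((w1, w2, w3), nget t (w1, w2, w3) + 1) := by
  simp only [stepA, bstep, nget]
  split_ifs with h1 h2 h3 <;>
    simp_all [PySem.Dict.getD_insert_self, PySem.Dict.insert_insert_self,
      PySem.Dict.getD_of_not_contains]


theorem bstep_collapse (t : PySem.Dict String (PySem.Dict String (PySem.Dict String Int)))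
    (k : String × String × String) (a b : Int) :
    bstep (bstep t (k, a)) (k, b) = bstep t (k, b) := by
  simp [bstep, PySem.Dict.getD_insert_self, PySem.Dict.insert_insert_self]


theorem nget_bstep (t : PySem.Dict String (PySem.Dict String (PySem.Dict String Int)))
    (k k' : String × String × String) (c : Int) :
    nget (bstep t (k', c)) k = if k = k' then c else nget t k := by
  obtain ⟨x1, x2, x3⟩ := k; obtain ⟨y1, y2, y3⟩ := k'
  simp only [nget, bstep, PySem.Dict.getD_insert, Prod.ext_iff]
  by_cases h1 : x1 = y1 <;> by_cases h2 : x2 = y2 <;> by_cases h3 : x3 = y3 <;>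
    simp_all [PySem.Dict.getD_insert]


theorem pmem_bstep (t : PySem.Dict String (PySem.Dict String (PySem.Dict String Int)))
    (k : String × String × String) (e : (String × String × String) × Int) :
    pmem (bstep t e) k ↔ k = e.1 ∨ pmem t k := by
  obtain ⟨⟨y1, y2, y3⟩, c⟩ := e; obtain ⟨x1, x2, x3⟩ := k
  simp only [pmem, bstep, PySem.Dict.getD_insert, Prod.mk.injEq]
  by_cases h1 : x1 = y1 <;> by_cases h2 : x2 = y2 <;> by_cases h3 : x3 = y3 <;>
    simp_all [PySem.Dict.contains_insert, PySem.Dict.getD_insert]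


theorem insert_comm_of_contains {κ ν : Type} [BEq κ] [LawfulBEq κ] (d : PySem.Dict κ ν)
    (k k' : κ) (v v' : ν) (hc : d.contains k = true) (hne : k ≠ k') :
    (d.insert k v).insert k' v' = (d.insert k' v').insert k v := by
  have e1 : (k' == k) = false := beq_eq_false_iff_ne.2 (Ne.symm hne)
  have e2 : (k == k') = false := beq_eq_false_iff_ne.2 hne
  apply PySem.Dict.ext
  by_cases hc' : d.contains k' = true
  · rw [PySem.Dict.items_insert_of_contains _ v' (by simp [PySem.Dict.contains_insert, hc']),
        PySem.Dict.items_insert_of_contains _ v hc,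
        PySem.Dict.items_insert_of_contains _ v (by simp [PySem.Dict.contains_insert, hc]),
        PySem.Dict.items_insert_of_contains _ v' hc', List.map_map, List.map_map]
    refine List.map_congr_left ?_
    intro p _
    simp only [Function.comp]
    by_cases h1 : p.1 == k <;> by_cases h2 : p.1 == k' <;>
      simp_all [beq_iff_eq, Ne.symm hne]
  · rw [PySem.Dict.items_insert_of_not_contains _ v' (by simp [PySem.Dict.contains_insert, e1, hc']),
        PySem.Dict.items_insert_of_contains _ v hc,
        PySem.Dict.items_insert_of_contains _ v (by simp [PySem.Dict.contains_insert, hc]),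
        PySem.Dict.items_insert_of_not_contains _ v' (by simpa using hc')]
    rw [List.map_append]
    simp [e1]


theorem bstep_comm (t : PySem.Dict String (PySem.Dict String (PySem.Dict String Int)))
    (k : String × String × String) (v : Int) (e : (String × String × String) × Int)
    (hp : pmem t k) (hne : k ≠ e.1) :
    bstep (bstep t (k, v)) e = bstep (bstep t e) (k, v) := by
  obtain ⟨⟨y1, y2, y3⟩, w⟩ := e
  obtain ⟨x1, x2, x3⟩ := k
  simp only [pmem] at hp
  have h2 : ((t.getD x1 PySem.Dict.empty).contains x2) = true := by
    by_contra h
    rw [PySem.Dict.getD_of_not_contains _ _ (Bool.eq_false_iff.2 h)] at hp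
    simp [PySem.Dict.contains_empty] at hp
  have h1 : (t.contains x1) = true := by
    by_contra h
    rw [PySem.Dict.getD_of_not_contains _ _ (Bool.eq_false_iff.2 h)] at hp
    simp [PySem.Dict.getD_empty, PySem.Dict.contains_empty] at hp
  by_cases a1 : y1 = x1
  · subst a1
    by_cases a2 : y2 = x2
    · subst a2
      have a3 : y3 ≠ x3 := fun h => hne (by simp [h])
      simp only [bstep, PySem.Dict.getD_insert_self, PySem.Dict.insert_insert_self]
      rw [insert_comm_of_contains _ _ _ _ _ hp (Ne.symm a3)]
    · simp only [bstep, PySem.Dict.getD_insert_self, PySem.Dict.insert_insert_self,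
        PySem.Dict.getD_insert, if_neg a2, if_neg (fun h => a2 (Eq.symm h))]
      exact congrArg (t.insert y1) (insert_comm_of_contains _ _ _ _ _ h2 (fun h => a2 (Eq.symm h)))
  · simp only [bstep, PySem.Dict.getD_insert, if_neg a1, if_neg (fun h => a1 (Eq.symm h))]
    rw [insert_comm_of_contains _ _ _ _ _ h1 (fun h => a1 (Eq.symm h))]


theorem foldl_bstep_out (l : List ((String × String × String) × Int))
    (t : PySem.Dict String (PySem.Dict String (PySem.Dict String Int)))
    (k : String × String × String) (v : Int)
    (hp : pmem t k) (hl : ∀ e ∈ l, e.1 ≠ k) :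
    l.foldl bstep (bstep t (k, v)) = bstep (l.foldl bstep t) (k, v) := by
  induction l generalizing t with
  | nil => rfl
  | cons e l ih =>
    simp only [List.foldl_cons]
    rw [bstep_comm t k v e hp (fun h => hl e (by simp) h.symm)]
    exact ih (bstep t e) ((pmem_bstep t k e).2 (Or.inr hp)) (fun e' he' => hl e' (by simp [he']))


theorem nget_foldl (ts : List (String × String × String)) (k : String × String × String) :
    nget (ts.foldl gA PySem.Dict.empty) k = (ts.count k : Int) := by
  induction ts using List.reverseRecOn with
  | nil => simp [nget, PySem.Dict.getD_empty]
  | append_singleton ts kk ih =>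
    rw [List.foldl_append, List.foldl_cons, List.foldl_nil]
    show nget (gA (ts.foldl gA PySem.Dict.empty) kk) k = _
    obtain ⟨w1, w2, w3⟩ := kk
    rw [gA, stepA_eq, nget_bstep]
    by_cases h : k = (w1, w2, w3)
    · subst h
      simp [ih, List.count_append]
    · simp [h, ih, List.count_append, List.count_singleton]
      exact fun hh => h (Eq.symm hh)


-- decompose an assoc list with nodup keys around a member, and compute in-place replacement
theorem map_replace_split {κ ν : Type} [BEq κ] [LawfulBEq κ] (l : List (κ × ν)) (k : κ) (c v : ν)
    (hnd : (l.map Prod.fst).Nodup) (hm : (k, c) ∈ l) :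
    ∃ l1 l2, l = l1 ++ (k, c) :: l2 ∧ (∀ e ∈ l1, e.1 ≠ k) ∧ (∀ e ∈ l2, e.1 ≠ k) ∧
      l.map (fun p => if p.1 == k then (k, v) else p) = l1 ++ (k, v) :: l2 := by
  obtain ⟨l1, l2, rfl⟩ := List.append_of_mem hm
  rw [List.map_append, List.nodup_append] at hnd
  obtain ⟨hn1, hn2, hdisj⟩ := hnd
  have h1 : ∀ e ∈ l1, e.1 ≠ k := by
    intro e he heq
    have hmem : e.1 ∈ List.map Prod.fst l1 := List.mem_map_of_mem he
    rw [heq] at hmem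
    exact hdisj k hmem k (by simp) rfl
  have h2 : ∀ e ∈ l2, e.1 ≠ k := by
    intro e he heq
    rw [List.map_cons] at hn2
    have hmem : e.1 ∈ List.map Prod.fst l2 := List.mem_map_of_mem he
    rw [heq] at hmem
    exact (List.nodup_cons.1 hn2).1 hmem
  refine ⟨l1, l2, rfl, h1, h2, ?_⟩
  rw [List.map_append, List.map_cons]
  congr 1
  · refine (List.map_congr_left ?_).trans (List.map_id l1)
    intro p hp
    simp [beq_eq_false_iff_ne.2 (h1 p hp)]
  · simp only [beq_self_eq_true, if_pos]
    congr 1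
    refine (List.map_congr_left ?_).trans (List.map_id l2)
    intro p hp
    simp [beq_eq_false_iff_ne.2 (h2 p hp)]


-- the heart: running pass 2 of B over the flat counter rebuilds A's nested dict
theorem build_eq (ts : List (String × String × String)) :
    ((ts.foldl fstep PySem.Dict.empty).items).foldl bstep PySem.Dict.empty
      = ts.foldl gA PySem.Dict.empty := by
  induction ts using List.reverseRecOn with
  | nil => rfl
  | append_singleton ts kk ih =>
    set F := ts.foldl fstep PySem.Dict.empty with hF
    set N := ts.foldl gA PySem.Dict.empty with hN
    have hnd : F.keys.Nodup :=
      PySem.Dict.nodup_keys_foldl_insert ts (fun d x => d.getD x 0 + 1) _ PySem.Dict.nodup_keys_empty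
    have hget : F.getD kk 0 = (ts.count kk : Int) := by
      simpa [PySem.Dict.getD_empty] using PySem.Dict.getD_foldl_insert_add_one ts PySem.Dict.empty kk
    have hrhs : (ts ++ [kk]).foldl gA PySem.Dict.empty = bstep N ((kk.1, kk.2.1, kk.2.2), (ts.count kk : Int) + 1) := by
      rw [List.foldl_append, List.foldl_cons, List.foldl_nil, ← hN]
      show stepA N kk.1 kk.2.1 kk.2.2 = _
      rw [stepA_eq]
      have : nget N (kk.1, kk.2.1, kk.2.2) = (ts.count kk : Int) := by
        rw [hN]; simpa using nget_foldl ts kk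
      rw [this]
    have hkk : ((kk.1, kk.2.1, kk.2.2) : String × String × String) = kk := rfl
    rw [List.foldl_append, List.foldl_cons, List.foldl_nil, hrhs, hkk, ← hF]
    show ((fstep F kk).items).foldl bstep PySem.Dict.empty = _
    rw [fstep, hget]
    by_cases hc : F.contains kk = true
    · have hmemk : kk ∈ F.keys := (PySem.Dict.contains_iff_mem_keys F kk).1 hc
      have hndi : (F.items.map Prod.fst).Nodup := by
        simpa [PySem.Dict.keys] using hnd
      have hmemk' : kk ∈ F.items.map Prod.fst := by simpa [PySem.Dict.keys] using hmemk
      obtain ⟨p, hp, hpk⟩ := List.mem_map.1 hmemk'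
      have hpv : F.getD p.1 0 = p.2 := PySem.Dict.getD_of_mem_items F (by simpa using hp) hnd 0
      have hm : (kk, (ts.count kk : Int)) ∈ F.items := by
        have : p = (kk, (ts.count kk : Int)) := by
          have : p.2 = (ts.count kk : Int) := by rw [← hpv, hpk, hget]
          exact Prod.ext hpk this
        rwa [this] at hp
      obtain ⟨l1, l2, heq, h1, h2, hmap⟩ :=
        map_replace_split F.items kk ((ts.count kk : Int)) ((ts.count kk : Int) + 1) hndi hm
      rw [PySem.Dict.items_insert_of_contains _ _ hc, hmap]
      rw [List.foldl_append, List.foldl_cons]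
      set P := l1.foldl bstep PySem.Dict.empty with hP
      rw [show bstep P (kk, (ts.count kk : Int) + 1)
            = bstep (bstep P (kk, (ts.count kk : Int))) (kk, (ts.count kk : Int) + 1) from
          (bstep_collapse P kk _ _).symm]
      rw [foldl_bstep_out l2 _ kk _ ((pmem_bstep _ kk (kk, (ts.count kk : Int))).2 (Or.inl rfl)) h2]
      have : l2.foldl bstep (bstep P (kk, (ts.count kk : Int))) = N := by
        rw [← ih, heq, List.foldl_append, List.foldl_cons]
      rw [this]
    · have hc' : F.contains kk = false := Bool.eq_false_iff.2 hc
      rw [PySem.Dict.items_insert_of_not_contains _ _ hc']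
      rw [List.foldl_append, List.foldl_cons, List.foldl_nil, ih]


-- ===== VERDICT (by name: the statement is the Claim_ definition above) =====
theorem get_words_count_spec : Claim_equal_get_words_count := by
  intro sts _
  unfold Spec_get_words_count get_words_count get_words_count_alt
  have hA : (sts.foldl (fun t s =>
      (PySem.List.pyRange 0 ((s.length : Int) - 2) 1).foldl (fun t i =>
        stepA t (PySem.List.pyGetD s i "") (PySem.List.pyGetD s (i + 1) "") (PySem.List.pyGetD s (i + 2) ""))
        t) PySem.Dict.empty)
      = (sts.flatMap tris).foldl gA PySem.Dict.empty := by
    rw [List.foldl_flatMap]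
    exact PySem.List.foldl_congr_mem _ _ _ _ (by intro t s _; exact foldl_pyRange_tris gA s t)
  have hB : (sts.foldl (fun d s =>
      (PySem.List.pyRange 0 ((s.length : Int) - 2) 1).foldl (fun d i =>
        let key := (PySem.List.pyGetD s i "", PySem.List.pyGetD s (i + 1) "", PySem.List.pyGetD s (i + 2) "")
        d.insert key (d.getD key 0 + 1)) d) PySem.Dict.empty)
      = (sts.flatMap tris).foldl fstep PySem.Dict.empty := by
    rw [List.foldl_flatMap]
    exact PySem.List.foldl_congr_mem _ _ _ _ (by intro d s _; exact foldl_pyRange_tris fstep s d)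
  rw [hA, hB]
  exact congrArg toNested (build_eq _).symm
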